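-- pv_equiv track=rewrite | github.com/mrcodestealer/osedutybot | cpms_duty.py | _normalize_weekday_label
-- ===== SOURCE A (Python) =====
-- _WEEKDAYS = ("Monday", "Tuesday", "Wednesday", "Thursday", "Friday", "Saturday", "Sunday")
--
-- def _normalize_weekday_label(text: str) -> str:
--     raw = (text or "").strip()
--     if not raw:
--         return ""
--     low = raw.lower()
--     for day in _WEEKDAYS:
--         if low == day.lower():
--             return day
--     return raw
-- ===== SOURCE B (Python) =====
-- _WEEKDAYS = ("Monday", "Tuesday", "Wednesday", "Thursday", "Friday", "Saturday", "Sunday")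
--
-- def _normalize_weekday_label(text: str) -> str:
--     # Closed-form: capitalize() yields the canonical spelling directly,
--     # so no case-insensitive scan over the weekday list is needed.
--     raw = (text or "").strip()
--     if not raw:
--         return ""
--     cap = raw.capitalize()
--     return cap if cap in _WEEKDAYS else raw
-- ===== Notes on version B (the rewrite author's own statement) =====
-- stated objective: simpler
-- what changed: Replaces the per-weekday case-insensitive comparison loop with a single closed-form transform (str.capitalize) plus one membership test against the canonical tuple.
import Mathlib
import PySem

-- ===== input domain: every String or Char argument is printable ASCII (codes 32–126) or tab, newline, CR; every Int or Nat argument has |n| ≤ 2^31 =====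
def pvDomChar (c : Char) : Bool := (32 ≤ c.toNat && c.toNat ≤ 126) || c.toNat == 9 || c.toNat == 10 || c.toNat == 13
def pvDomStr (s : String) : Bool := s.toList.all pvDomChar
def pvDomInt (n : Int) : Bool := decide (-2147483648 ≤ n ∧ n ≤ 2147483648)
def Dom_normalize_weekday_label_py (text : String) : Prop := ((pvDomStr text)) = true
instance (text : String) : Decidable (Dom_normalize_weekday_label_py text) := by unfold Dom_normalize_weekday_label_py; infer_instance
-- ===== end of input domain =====

-- B replaces A's case-insensitive scan over the weekday tuple by capitalize() + one membership test (objective: simpler).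

-- ===== PORT A =====
-- _WEEKDAYS module constant
def pvWeekdays : List String :=
  ["Monday", "Tuesday", "Wednesday", "Thursday", "Friday", "Saturday", "Sunday"]

-- 'for day in _WEEKDAYS: if low == day.lower(): return day' then 'return raw'
def pvFindDay (low raw : String) : List String → String
  | [] => raw
  | d :: rest => if low = PySem.Str.lower d then d else pvFindDay low raw rest

-- '(text or "")' is the identity before .strip(): '' strips to '' anyway
def normalize_weekday_label_py (text : String) : String :=
  if PySem.Str.strip text = "" then ""
  else pvFindDay (PySem.Str.lower (PySem.Str.strip text)) (PySem.Str.strip text) pvWeekdays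

-- ===== PORT B =====
-- Python str.capitalize(): first char upper-cased, the rest lower-cased (exact on ASCII,
-- where title-case = upper-case; ported by hand, PySem has no capitalize)
def pvCapitalize (s : String) : String :=
  match s.toList with
  | [] => ""
  | c :: cs => String.ofList (PySem.Chars.upperChar c :: PySem.Chars.lower cs)

def normalize_weekday_label_py_alt (text : String) : String :=
  if PySem.Str.strip text = "" then ""
  else
    if pvCapitalize (PySem.Str.strip text) ∈ pvWeekdays
    then pvCapitalize (PySem.Str.strip text)
    else PySem.Str.strip text

-- ===== PRECONDITION & SPEC =====
def Spec_normalize_weekday_label_py (text : String) (out : String) : Prop := out = normalize_weekday_label_py_alt text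
instance (text : String) (out : String) : Decidable (Spec_normalize_weekday_label_py text out) := by unfold Spec_normalize_weekday_label_py; infer_instance

-- ===== CLAIM (what is proved, stated in full; the proofs are below) =====
def Claim_equal_normalize_weekday_label_py : Prop := ∀ (text : String), Dom_normalize_weekday_label_py text → Spec_normalize_weekday_label_py text (normalize_weekday_label_py text)

-- ===== LEMMAS AND PROOFS =====

theorem pvChLe (c d : Char) : c ≤ d ↔ c.toNat ≤ d.toNat := by
  rw [Char.le_def, UInt32.le_iff_toNat_le]; rfl

theorem pvChEq (c d : Char) : c = d ↔ c.toNat = d.toNat := by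
  constructor
  · intro h; rw [h]
  · intro h; apply Char.ext; exact UInt32.toNat_inj.mp h

theorem pvChOfNat (n : Nat) (h : n < 55296) : (Char.ofNat n).toNat = n := by
  rw [Char.toNat_ofNat]; simp [Nat.isValidChar, h]

-- upper ∘ lower = upper on chars
theorem pvUL (c : Char) : PySem.Chars.upperChar (PySem.Chars.lowerChar c) = PySem.Chars.upperChar c := by
  have hA : ('A' : Char).toNat = 65 := by decide
  have hZ : ('Z' : Char).toNat = 90 := by decide
  have ha : ('a' : Char).toNat = 97 := by decide
  have hz : ('z' : Char).toNat = 122 := by decide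
  simp only [PySem.Chars.lowerChar, PySem.Chars.upperChar, PySem.Chars.isupper, PySem.Chars.islower,
    Bool.and_eq_true, decide_eq_true_eq, pvChLe, hA, hZ, ha, hz]
  by_cases h1 : 65 ≤ c.toNat ∧ c.toNat ≤ 90
  · have hv : (Char.ofNat (c.toNat + 32)).toNat = c.toNat + 32 := pvChOfNat _ (by omega)
    rw [if_pos h1, hv, if_pos (by omega), if_neg (by omega), pvChEq, pvChOfNat _ (by omega)]
    omega
  · rw [if_neg h1]

-- lower ∘ upper = lower on chars
theorem pvLU (c : Char) : PySem.Chars.lowerChar (PySem.Chars.upperChar c) = PySem.Chars.lowerChar c := by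
  have hA : ('A' : Char).toNat = 65 := by decide
  have hZ : ('Z' : Char).toNat = 90 := by decide
  have ha : ('a' : Char).toNat = 97 := by decide
  have hz : ('z' : Char).toNat = 122 := by decide
  simp only [PySem.Chars.lowerChar, PySem.Chars.upperChar, PySem.Chars.isupper, PySem.Chars.islower,
    Bool.and_eq_true, decide_eq_true_eq, pvChLe, hA, hZ, ha, hz]
  by_cases h1 : 97 ≤ c.toNat ∧ c.toNat ≤ 122
  · have hv : (Char.ofNat (c.toNat - 32)).toNat = c.toNat - 32 := pvChOfNat _ (by omega)
    rw [if_pos h1, hv, if_pos (by omega), if_neg (by omega), pvChEq, pvChOfNat _ (by omega)]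
    omega
  · rw [if_neg h1]

theorem pvStrEq (s t : String) : s = t ↔ s.toList = t.toList := by
  constructor
  · intro h; rw [h]
  · intro h; exact String.toList_inj.mp h

-- the key day-by-day equivalence: 'low == day.lower()' iff 'raw.capitalize() == day'
theorem pvDayIff (raw : String) (c : Char) (cs : List Char) (hraw : raw.toList = c :: cs)
    (d : String) (D : Char) (Ds : List Char) (hd : d.toList = D :: Ds)
    (hD : PySem.Chars.upperChar D = D) (hDs : PySem.Chars.lower Ds = Ds) :
    (PySem.Str.lower raw = PySem.Str.lower d) ↔ (pvCapitalize raw = d) := by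
  rw [pvStrEq, pvStrEq]
  simp only [pvCapitalize, hraw, PySem.Str.toList_lower, hd, PySem.Chars.lower, List.map_cons,
    String.toList_ofList, List.cons.injEq]
  have hDs' : List.map PySem.Chars.lowerChar Ds = Ds := hDs
  rw [hDs']
  constructor
  · rintro ⟨h1, h2⟩; exact ⟨by rw [← pvUL c, h1, pvUL D, hD], h2⟩
  · rintro ⟨h1, h2⟩; exact ⟨by rw [← pvLU c, h1], h2⟩

-- ===== VERDICT (by name: the statement is the Claim_ definition above) =====
theorem normalize_weekday_label_py_spec : Claim_equal_normalize_weekday_label_py := by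
  intro text _
  unfold Spec_normalize_weekday_label_py normalize_weekday_label_py normalize_weekday_label_py_alt
  by_cases h : PySem.Str.strip text = ""
  · simp [h]
  · simp only [h, if_false]
    obtain ⟨c, cs, hraw⟩ : ∃ c cs, (PySem.Str.strip text).toList = c :: cs := by
      rcases hl : (PySem.Str.strip text).toList with _ | ⟨c, cs⟩
      · exact absurd (String.toList_inj.mp (by simpa using hl)) h
      · exact ⟨c, cs, rfl⟩
    have m := fun d D Ds hd hD hDs => pvDayIff (PySem.Str.strip text) c cs hraw d D Ds hd hD hDs
    simp only [pvFindDay, pvWeekdays, List.mem_cons, List.not_mem_nil, or_false]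
    simp only [m "Monday" 'M' "onday".toList rfl (by decide) (by decide),
        m "Tuesday" 'T' "uesday".toList rfl (by decide) (by decide),
        m "Wednesday" 'W' "ednesday".toList rfl (by decide) (by decide),
        m "Thursday" 'T' "hursday".toList rfl (by decide) (by decide),
        m "Friday" 'F' "riday".toList rfl (by decide) (by decide),
        m "Saturday" 'S' "aturday".toList rfl (by decide) (by decide),
        m "Sunday" 'S' "unday".toList rfl (by decide) (by decide)]
    split_ifs <;> simp_all
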